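-- pv_equiv track=rewrite | github.com/arujbansal/cpdrills | CP_Platform/utils/codeforces.py | code_extract_contest
-- ===== SOURCE A (Python) =====
-- def code_extract_contest(problem_url):
--     code = ""
--
--     count = 0
--     for i in range(len(problem_url) - 1, -1, -1):
--         if problem_url[i] == '/':
--             count += 1
--             continue
--
--         if count == 1:
--             continue
--
--         if count >= 3:
--             break
--
--         code += problem_url[i]
--
--     return code[::-1]
-- ===== SOURCE B (Python) =====
-- def code_extract_contest(problem_url):
--     parts = problem_url.split('/')
--     head = parts[-3] if len(parts) >= 3 else ''
--     return head + parts[-1]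
-- ===== Notes on version B (the rewrite author's own statement) =====
-- stated objective: simpler
-- what changed: Replaced the reverse character-by-character scan with a slash counter and break by a single split('/') plus negative indexing (parts[-3] + parts[-1]).
import Mathlib
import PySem

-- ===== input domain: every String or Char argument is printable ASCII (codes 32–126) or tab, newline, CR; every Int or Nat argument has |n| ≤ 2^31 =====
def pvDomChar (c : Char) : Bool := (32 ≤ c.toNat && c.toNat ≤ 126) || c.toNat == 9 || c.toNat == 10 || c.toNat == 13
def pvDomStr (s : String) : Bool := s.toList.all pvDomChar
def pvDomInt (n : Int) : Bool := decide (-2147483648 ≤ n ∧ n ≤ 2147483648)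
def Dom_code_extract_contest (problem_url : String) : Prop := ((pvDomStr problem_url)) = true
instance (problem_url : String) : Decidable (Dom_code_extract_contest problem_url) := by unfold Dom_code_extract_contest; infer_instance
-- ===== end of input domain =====

-- B replaces A's reverse character scan with a slash counter and break by one split('/')
-- plus negative indexing (parts[-3] + parts[-1]); objective: simpler.

-- ===== PORT A =====
-- the backward loop `for i in range(len-1, -1, -1)` walking the characters from the end,
-- with `count` the number of '/' seen so far and the same branch order as A; the `break`
-- (count >= 3) ends the recursion. `code` is accumulated in scan order and reversed at the end.
def pvGoA : List Char → Int → List Char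
  | [], _ => []
  | c :: rest, count =>
    if c = '/' then pvGoA rest (count + 1)
    else if count = 1 then pvGoA rest count
    else if 3 ≤ count then []
    else c :: pvGoA rest count

def code_extract_contest (problem_url : String) : String :=
  String.ofList ((pvGoA problem_url.toList.reverse 0).reverse)

-- ===== PORT B =====
-- parts = problem_url.split('/'); (parts[-3] if len(parts) >= 3 else '') + parts[-1]
-- (parts is never empty, so the negative indexings always hit an element; getD [] is unreachable)
def pvParts (problem_url : String) : List (List Char) := problem_url.toList.splitOn '/'
def pvHead (parts : List (List Char)) : List Char :=
  if 3 ≤ parts.length then (PySem.List.pyGet? parts (-3)).getD [] else []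
def code_extract_contest_alt (problem_url : String) : String :=
  String.ofList (pvHead (pvParts problem_url) ++ (PySem.List.pyGet? (pvParts problem_url) (-1)).getD [])

-- ===== PRECONDITION & SPEC =====
def Spec_code_extract_contest (problem_url : String) (out : String) : Prop := out = code_extract_contest_alt problem_url
instance (problem_url : String) (out : String) : Decidable (Spec_code_extract_contest problem_url out) := by unfold Spec_code_extract_contest; infer_instance

-- ===== CLAIM (what is proved, stated in full; the proofs are below) =====
def Claim_equal_code_extract_contest : Prop := ∀ (problem_url : String), Dom_code_extract_contest problem_url → Spec_code_extract_contest problem_url (code_extract_contest problem_url)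

-- ===== LEMMAS AND PROOFS =====

-- what pvGoA computes, as a function of the slash-split of its (reversed) input and the count
def pvF (count : Int) (q : List (List Char)) : List Char :=
  if count = 0 then q.getD 0 [] ++ (if 3 ≤ q.length then q.getD 2 [] else [])
  else if count = 1 then (if 2 ≤ q.length then q.getD 1 [] else [])
  else if count = 2 then q.getD 0 []
  else []

lemma pvF_zero (q : List (List Char)) :
    pvF 0 q = q.getD 0 [] ++ (if 3 ≤ q.length then q.getD 2 [] else []) := by simp [pvF]

lemma pvF_one (q : List (List Char)) :
    pvF 1 q = (if 2 ≤ q.length then q.getD 1 [] else []) := by simp [pvF]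

lemma pvF_two (q : List (List Char)) : pvF 2 q = q.getD 0 [] := by simp [pvF]

lemma pvF_big (count : Int) (h : 3 ≤ count) (q : List (List Char)) : pvF count q = [] := by
  simp [pvF, show count ≠ 0 by omega, show count ≠ 1 by omega, show count ≠ 2 by omega]

-- appending a non-separator character extends the last piece of the split
lemma splitOnP_concat_of_neg {α : Type} (p : α → Bool) (c : α) (hc : p c = false) :
    ∀ ys : List α, (ys ++ [c]).splitOnP p = (ys.splitOnP p).modifyLast (· ++ [c]) := by
  intro ys
  induction ys with
  | nil =>
    simpa [List.splitOnP_cons, hc, List.splitOnP_nil] using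
      (List.modifyLast_concat (· ++ [c]) ([] : List α) []).symm
  | cons y ys ih =>
    rcases List.eq_nil_or_concat (ys.splitOnP p) with h | ⟨ws, w, h⟩
    · exact absurd h (List.splitOnP_ne_nil p ys)
    · simp only [List.concat_eq_append] at h
      by_cases hy : p y = true
      · rw [List.cons_append, List.splitOnP_cons, if_pos hy, ih, h,
          List.modifyLast_concat, List.splitOnP_cons, if_pos hy, h]
        simp only [← List.cons_append]
        rw [List.modifyLast_concat]
      · rw [List.cons_append, List.splitOnP_cons, if_neg hy, ih, h,
          List.modifyLast_concat, List.splitOnP_cons, if_neg hy, h]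
        cases ws with
        | nil =>
          simp only [List.nil_append, List.modifyHead_cons]
          have h1 := List.modifyLast_concat (· ++ [c]) (y :: w) ([] : List (List α))
          simp only [List.nil_append] at h1
          rw [h1]
          simp
        | cons w0 ws' =>
          simp only [List.cons_append, List.modifyHead_cons]
          simp only [← List.cons_append]
          rw [List.modifyLast_concat]

-- splitting the reverse = reversing the split (each piece reversed, pieces in reverse order)
lemma splitOnP_reverse {α : Type} (p : α → Bool) :
    ∀ l : List α, (l.reverse).splitOnP p = ((l.splitOnP p).map List.reverse).reverse := by
  intro l
  induction l with
  | nil => simp [List.splitOnP_nil]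
  | cons c l ih =>
    rw [List.reverse_cons]
    by_cases hc : p c = true
    · rw [List.splitOnP_append_cons p l.reverse [] c hc, List.splitOnP_nil, ih,
        List.splitOnP_cons, if_pos hc]
      simp
    · rw [splitOnP_concat_of_neg p c (by simpa using hc), ih,
        List.splitOnP_cons, if_neg hc]
      obtain ⟨q0, qr, hsp⟩ : ∃ q0 qr, l.splitOnP p = q0 :: qr := by
        rcases h' : l.splitOnP p with _ | ⟨a, b⟩
        · exact absurd h' (List.splitOnP_ne_nil p l)
        · exact ⟨a, b, rfl⟩
      rw [hsp]
      simp [List.modifyLast_concat]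

-- the loop invariant: pvGoA on a list with `count` slashes already passed is pvF of the split
lemma pvGoA_eq_pvF : ∀ (r : List Char) (count : Int), 0 ≤ count →
    pvGoA r count = pvF count (r.splitOnP (· == '/')) := by
  intro r
  induction r with
  | nil =>
    intro count hc0
    rcases (by omega : count = 0 ∨ count = 1 ∨ count = 2 ∨ 3 ≤ count) with h | h | h | h
    · subst h; simp [pvGoA, List.splitOnP_nil, pvF_zero]
    · subst h; simp [pvGoA, List.splitOnP_nil, pvF_one]
    · subst h; simp [pvGoA, List.splitOnP_nil, pvF_two]
    · rw [List.splitOnP_nil, pvF_big count h]; simp [pvGoA]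
  | cons c rest ih =>
    intro count hc0
    obtain ⟨q0, qr, hqe⟩ :
        ∃ q0 qr, rest.splitOnP (fun x => x == '/') = q0 :: qr := by
      rcases h' : rest.splitOnP (fun x => x == '/') with _ | ⟨a, b⟩
      · exact absurd h' (List.splitOnP_ne_nil _ rest)
      · exact ⟨a, b, rfl⟩
    by_cases hs : c = '/'
    · rw [List.splitOnP_cons, if_pos (by simp [hs])]
      simp only [pvGoA, if_pos hs]
      rw [ih (count + 1) (by omega), hqe]
      rcases (by omega : count = 0 ∨ count = 1 ∨ count = 2 ∨ 3 ≤ count) with h | h | h | h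
      · subst h
        rw [show (0 : Int) + 1 = 1 from rfl, pvF_one, pvF_zero]
        rcases qr with _ | ⟨q1, qr'⟩ <;> simp
      · subst h
        rw [show (1 : Int) + 1 = 2 from rfl, pvF_two, pvF_one]
        simp
      · subst h
        rw [show (2 : Int) + 1 = 3 from rfl, pvF_big 3 (by omega), pvF_two]
        simp
      · rw [pvF_big (count + 1) (by omega), pvF_big count h]
    · rw [List.splitOnP_cons, if_neg (by simp [hs]), hqe, List.modifyHead_cons]
      simp only [pvGoA, if_neg hs]
      rcases (by omega : count = 0 ∨ count = 1 ∨ count = 2 ∨ 3 ≤ count) with h | h | h | h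
      · subst h
        rw [if_neg (by decide : ¬ ((0 : Int) = 1)), if_neg (by decide : ¬ ((3 : Int) ≤ 0)),
          ih 0 le_rfl, hqe, pvF_zero, pvF_zero]
        simp
      · subst h
        rw [if_pos rfl, ih 1 (by omega), hqe, pvF_one, pvF_one]
        try simp
      · subst h
        rw [if_neg (by decide : ¬ ((2 : Int) = 1)), if_neg (by decide : ¬ ((3 : Int) ≤ 2)),
          ih 2 (by omega), hqe, pvF_two, pvF_two]
        try simp
      · rw [if_neg (by omega : ¬ (count = 1)), if_pos h, pvF_big count h]

-- negative Python indexing on a nonempty list, as getD from the back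
lemma pyGet_neg_getD (parts : List (List Char)) (k : Nat) (hk : k ≤ parts.length) (h1 : 1 ≤ k) :
    (PySem.List.pyGet? parts (-(k : Int))).getD [] = parts.getD (parts.length - k) [] := by
  simp only [PySem.List.pyGet?, PySem.List.pyIdx?]
  rw [List.getD_eq_getElem?_getD]
  split_ifs with h <;> simp_all

lemma pyGet_neg3 (parts : List (List Char)) (h : 3 ≤ parts.length) :
    (PySem.List.pyGet? parts (-3)).getD [] = parts.getD (parts.length - 3) [] := by
  have := pyGet_neg_getD parts 3 h (by omega)
  simpa using this

lemma pyGet_neg1 (parts : List (List Char)) (h : 1 ≤ parts.length) :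
    (PySem.List.pyGet? parts (-1)).getD [] = parts.getD (parts.length - 1) [] := by
  have := pyGet_neg_getD parts 1 h (by omega)
  simpa using this

-- indexing the reversed mapped split
lemma getD_rev_map (q : List (List Char)) (i : Nat) (hi : i < q.length) :
    ((q.map List.reverse).reverse).getD i [] = (q.getD (q.length - 1 - i) []).reverse := by
  rw [List.getD_eq_getElem?_getD, List.getD_eq_getElem?_getD,
    List.getElem?_reverse (by simpa using hi), List.getElem?_map]
  have h2 : q.length - 1 - i < q.length := by omega
  simp [List.getElem?_eq_getElem h2]

-- ===== VERDICT (by name: the statement is the Claim_ definition above) =====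
theorem code_extract_contest_spec : Claim_equal_code_extract_contest := by
  intro s _
  unfold Spec_code_extract_contest code_extract_contest code_extract_contest_alt pvHead pvParts
  rw [List.splitOn, pvGoA_eq_pvF _ 0 le_rfl, splitOnP_reverse]
  set q := s.toList.splitOnP (fun x => x == '/') with hq
  have hne : q ≠ [] := hq ▸ List.splitOnP_ne_nil _ _
  have hpos : 0 < q.length := List.length_pos_of_ne_nil hne
  have hql : ((q.map List.reverse).reverse).length = q.length := by simp
  rw [pvF_zero, hql]
  by_cases h3 : 3 ≤ q.length
  · rw [if_pos h3, if_pos h3,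
      getD_rev_map q 0 (by omega), getD_rev_map q 2 (by omega),
      pyGet_neg3 q h3, pyGet_neg1 q (by omega)]
    have e1 : q.length - 1 - 0 = q.length - 1 := by omega
    have e2 : q.length - 1 - 2 = q.length - 3 := by omega
    rw [e1, e2]
    simp
  · rw [if_neg h3, if_neg h3, getD_rev_map q 0 (by omega),
      pyGet_neg1 q (by omega)]
    have e1 : q.length - 1 - 0 = q.length - 1 := by omega
    rw [e1]
    simp
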